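-- pv_equiv track=rewrite | github.com/kcerauno/SLOT_AND_HMM | hypothesis/02_compound_hmm/source/base_count_analysis.py | find_v8_splits_first
-- ===== SOURCE A (Python) =====
-- SLOTS_V8 = [
--     ["l", "r", "o", "y", "s", "v"],
--     ["q", "s", "d", "x", "l", "r", "h", "z"],
--     ["o", "y"], ["d", "r"], ["t", "k", "p", "f"],
--     ["ch", "sh"], ["cth", "ckh", "cph", "cfh"],
--     ["eee", "ee", "e", "g"],
--     ["k", "t", "p", "f", "ch", "sh", "l", "r", "o", "y"],
--     ["s", "d", "c"], ["o", "a", "y"], ["iii", "ii", "i"],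
--     ["d", "l", "r", "m", "n"], ["s"], ["y"],
--     ["k", "t", "p", "f", "l", "r", "o", "y"],
-- ]
--
-- def parse_greedy(word):
--     pos, matched = 0, []
--     for idx, options in enumerate(SLOTS_V8):
--         if pos >= len(word):
--             break
--         for opt in options:
--             if word.startswith(opt, pos):
--                 matched.append((idx, opt))
--                 pos += len(opt)
--                 break
--     return matched, word[pos:]
--
-- def is_base(word):
--     m, r = parse_greedy(word)
--     return r == "" and bool(m)
--
-- def find_v8_splits_first(word):
--     for i in range(1, len(word)):
--         p1 = word[:i]
--         if not is_base(p1):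
--             continue
--         rest = word[i:]
--         if is_base(rest):
--             return (p1, rest)
--         for j in range(1, len(rest)):
--             p2 = rest[:j]
--             if not is_base(p2):
--                 continue
--             rest2 = rest[j:]
--             if is_base(rest2):
--                 return (p1, p2, rest2)
--             for kk in range(1, len(rest2)):
--                 if is_base(rest2[:kk]) and is_base(rest2[kk:]):
--                     return (p1, p2, rest2[:kk], rest2[kk:])
--     return None
-- ===== SOURCE B (Python) =====
-- SLOTS_V8 = [
--     ["l", "r", "o", "y", "s", "v"],
--     ["q", "s", "d", "x", "l", "r", "h", "z"],
--     ["o", "y"], ["d", "r"], ["t", "k", "p", "f"],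
--     ["ch", "sh"], ["cth", "ckh", "cph", "cfh"],
--     ["eee", "ee", "e", "g"],
--     ["k", "t", "p", "f", "ch", "sh", "l", "r", "o", "y"],
--     ["s", "d", "c"], ["o", "a", "y"], ["iii", "ii", "i"],
--     ["d", "l", "r", "m", "n"], ["s"], ["y"],
--     ["k", "t", "p", "f", "l", "r", "o", "y"],
-- ]
--
-- def _advance(word, pos, options):
--     """Position after the greedy match of one slot (pos itself if no option matches)."""
--     for opt in options:
--         if word.startswith(opt, pos):
--             return pos + len(opt)
--     return pos
--
-- def _greedy_len(word):
--     """Length of the prefix consumed by the greedy slot parse (no matched list kept)."""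
--     pos = 0
--     for options in SLOTS_V8:
--         pos = _advance(word, pos, options)
--     return pos
--
-- def _is_base(word):
--     return len(word) > 0 and _greedy_len(word) == len(word)
--
-- def _rec(word, i, max_parts):
--     """First way to write word[i:] as 1..max_parts base segments: whole suffix first,
--     then increasing cut positions; index-based, no substring juggling in the search."""
--     if _is_base(word[i:]):
--         return (word[i:],)
--     if max_parts <= 1:
--         return None
--     for k in range(i + 1, len(word)):
--         if _is_base(word[i:k]):
--             r = _rec(word, k, max_parts - 1)
--             if r is not None:
--                 return (word[i:k],) + r
--     return None
--
-- def find_v8_splits_first(word):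
--     for i in range(1, len(word)):
--         if _is_base(word[:i]):
--             r = _rec(word, i, 3)
--             if r is not None:
--                 return (word[:i],) + r
--     return None
-- ===== Notes on version B (the rewrite author's own statement) =====
-- stated objective: simpler
-- what changed: Replaced the matched-list greedy parser by a consumed-length counter for the base test, and the three hand-unrolled nested split loops by one index-based recursive search rec(word, i, max_parts) preserving the exact first-match order.
import Mathlib
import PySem

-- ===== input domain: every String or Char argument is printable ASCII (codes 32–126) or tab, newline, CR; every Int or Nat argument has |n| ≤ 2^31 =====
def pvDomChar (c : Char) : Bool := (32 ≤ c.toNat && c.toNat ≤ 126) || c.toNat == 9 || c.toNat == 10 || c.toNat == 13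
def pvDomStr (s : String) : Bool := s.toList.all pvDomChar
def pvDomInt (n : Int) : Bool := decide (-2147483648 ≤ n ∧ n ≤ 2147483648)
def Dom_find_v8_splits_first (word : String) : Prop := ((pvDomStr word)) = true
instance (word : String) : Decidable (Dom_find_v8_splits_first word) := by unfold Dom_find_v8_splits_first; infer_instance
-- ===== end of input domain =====

-- B replaces A's three hand-unrolled nested split loops by an index-based recursive
-- search rec(word,i,max_parts), and replaces A's matched-list greedy parser by a
-- pure consumed-length counter for the base test (simpler decomposition; same cost).


-- shared module constant SLOTS_V8 (both Python files read the same list)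
def pvSlotsV8 : List (List (List Char)) :=
  [[['l'], ['r'], ['o'], ['y'], ['s'], ['v']],
   [['q'], ['s'], ['d'], ['x'], ['l'], ['r'], ['h'], ['z']],
   [['o'], ['y']], [['d'], ['r']], [['t'], ['k'], ['p'], ['f']],
   [['c','h'], ['s','h']], [['c','t','h'], ['c','k','h'], ['c','p','h'], ['c','f','h']],
   [['e','e','e'], ['e','e'], ['e'], ['g']],
   [['k'], ['t'], ['p'], ['f'], ['c','h'], ['s','h'], ['l'], ['r'], ['o'], ['y']],
   [['s'], ['d'], ['c']], [['o'], ['a'], ['y']], [['i','i','i'], ['i','i'], ['i']],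
   [['d'], ['l'], ['r'], ['m'], ['n']], [['s']], [['y']],
   [['k'], ['t'], ['p'], ['f'], ['l'], ['r'], ['o'], ['y']]]

-- ===== PORT A =====
-- 'for idx, options in enumerate(SLOTS_V8)' loop of parse_greedy, state (pos, matched)
def pvPgLoop (w : List Char) : List (Int × List (List Char)) → Nat → List (Int × List Char) →
    Nat × List (Int × List Char)
  | [], pos, m => (pos, m)
  | (idx, options) :: rest, pos, m =>
    if w.length ≤ pos then (pos, m)    -- 'if pos >= len(word): break'
    else
      match options.find? (fun opt => opt.isPrefixOf (w.drop pos)) with  -- inner for/startswith/break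
      | some opt => pvPgLoop w rest (pos + opt.length) (m ++ [(idx, opt)])
      | none => pvPgLoop w rest pos m

def pvParseGreedy (w : List Char) : List (Int × List Char) × List Char :=
  let r := pvPgLoop w (PySem.List.enumerate pvSlotsV8) 0 []
  (r.2, w.drop r.1)

def pvIsBase (w : List Char) : Bool :=
  let p := pvParseGreedy w
  p.2 == [] && !p.1.isEmpty

-- innermost 'for kk in range(1, len(rest2))'
def pvLoopKK (rest2 : List Char) : List Nat → Option (List (List Char))
  | [] => none
  | kk :: t =>
    if pvIsBase (rest2.take kk) && pvIsBase (rest2.drop kk) then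
      some [rest2.take kk, rest2.drop kk]
    else pvLoopKK rest2 t

-- middle 'for j in range(1, len(rest))'
def pvLoopJ (rest : List Char) : List Nat → Option (List (List Char))
  | [] => none
  | j :: t =>
    let p2 := rest.take j
    if !pvIsBase p2 then pvLoopJ rest t
    else
      let rest2 := rest.drop j
      if pvIsBase rest2 then some [p2, rest2]
      else
        match pvLoopKK rest2 (List.range' 1 (rest2.length - 1)) with
        | some l => some (p2 :: l)
        | none => pvLoopJ rest t

-- outer 'for i in range(1, len(word))'
def pvLoopI (w : List Char) : List Nat → Option (List (List Char))
  | [] => none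
  | i :: t =>
    let p1 := w.take i
    if !pvIsBase p1 then pvLoopI w t
    else
      let rest := w.drop i
      if pvIsBase rest then some [p1, rest]
      else
        match pvLoopJ rest (List.range' 1 (rest.length - 1)) with
        | some l => some (p1 :: l)
        | none => pvLoopI w t

def find_v8_splits_first (word : String) : Option (List String) :=
  (pvLoopI word.toList (List.range' 1 (word.toList.length - 1))).map (List.map String.ofList)

-- ===== PORT B =====
-- '_advance': position after the greedy match of one slot
def pvAdvance (w : List Char) (pos : Nat) (options : List (List Char)) : Nat :=
  match options.find? (fun opt => opt.isPrefixOf (w.drop pos)) with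
  | some opt => pos + opt.length
  | none => pos

-- '_greedy_len': fold _advance over the slots, no matched list, no break
def pvGreedyLen (w : List Char) : Nat := pvSlotsV8.foldl (pvAdvance w) 0

-- '_is_base'
def pvIsBaseB (w : List Char) : Bool := decide (0 < w.length) && (pvGreedyLen w == w.length)

-- '_rec(word, i, max_parts)', fuel = max_parts; word[i:k] ported as (w.drop i).take (k-i)
-- (exact for the in-range nonnegative i ≤ k these calls use)
def pvRecB : Nat → List Char → Nat → Option (List (List Char))
  | 0, w, i => if pvIsBaseB (w.drop i) then some [w.drop i] else none
  | m + 1, w, i =>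
    if pvIsBaseB (w.drop i) then some [w.drop i]
    else if m + 1 ≤ 1 then none
    else
      (List.range' (i + 1) (w.length - (i + 1))).findSome? (fun k =>
        if pvIsBaseB ((w.drop i).take (k - i)) then
          (pvRecB m w k).map (fun r => (w.drop i).take (k - i) :: r)
        else none)

def find_v8_splits_first_alt (word : String) : Option (List String) :=
  let w := word.toList
  ((List.range' 1 (w.length - 1)).findSome? (fun i =>
      if pvIsBaseB (w.take i) then (pvRecB 3 w i).map (fun r => w.take i :: r)
      else none)).map (List.map String.ofList)

-- ===== PRECONDITION & SPEC =====
def Spec_find_v8_splits_first (word : String) (out : Option (List String)) : Prop := out = find_v8_splits_first_alt word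
instance (word : String) (out : Option (List String)) : Decidable (Spec_find_v8_splits_first word out) := by unfold Spec_find_v8_splits_first; infer_instance

-- ===== CLAIM (what is proved, stated in full; the proofs are below) =====
def Claim_equal_find_v8_splits_first : Prop := ∀ (word : String), Dom_find_v8_splits_first word → Spec_find_v8_splits_first word (find_v8_splits_first word)

-- ===== LEMMAS AND PROOFS =====

-- pvAdvance does nothing once the word is consumed (all options are nonempty)
theorem pvAdvance_at_end (w : List Char) (options : List (List Char))
    (hne : ∀ o ∈ options, o ≠ ([] : List Char)) :
    pvAdvance w w.length options = w.length := by
  unfold pvAdvance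
  have : options.find? (fun opt => opt.isPrefixOf (w.drop w.length)) = none := by
    rw [List.find?_eq_none]
    intro o ho
    simp [List.drop_length, List.isPrefixOf_iff_prefix]
    exact hne o ho
  rw [this]

theorem foldl_advance_at_end (w : List Char) (L : List (List (List Char)))
    (hne : ∀ os ∈ L, ∀ o ∈ os, o ≠ ([] : List Char)) :
    L.foldl (pvAdvance w) w.length = w.length := by
  induction L with
  | nil => rfl
  | cons os t ih =>
    simp only [List.foldl_cons]
    rw [pvAdvance_at_end w os (hne os (by simp))]
    exact ih (fun os' h o ho => hne os' (by simp [h]) o ho)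

-- shape facts about the loop, used by the invariant proof
theorem pvPgLoop_suffix (w : List Char) (L : List (Int × List (List Char))) :
    ∀ (pos : Nat) (m : List (Int × List Char)), ∃ tl, (pvPgLoop w L pos m).2 = m ++ tl := by
  induction L with
  | nil => intro pos m; exact ⟨[], by simp [pvPgLoop]⟩
  | cons p t ih =>
    intro pos m
    obtain ⟨idx, options⟩ := p
    by_cases hend : w.length ≤ pos
    · exact ⟨[], by simp [pvPgLoop, hend]⟩
    · cases hf : options.find? (fun opt => opt.isPrefixOf (w.drop pos)) with
      | none => simpa [pvPgLoop, hend, hf] using ih pos m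
      | some opt =>
        obtain ⟨tl, htl⟩ := ih (pos + opt.length) (m ++ [(idx, opt)])
        exact ⟨(idx, opt) :: tl, by simp [pvPgLoop, hend, hf, htl]⟩

theorem pvPgLoop_pos_le (w : List Char) (L : List (Int × List (List Char))) :
    ∀ (pos : Nat) (m : List (Int × List Char)), pos ≤ (pvPgLoop w L pos m).1 := by
  induction L with
  | nil => intro pos m; simp [pvPgLoop]
  | cons p t ih =>
    intro pos m
    obtain ⟨idx, options⟩ := p
    by_cases hend : w.length ≤ pos
    · simp [pvPgLoop, hend]
    · cases hf : options.find? (fun opt => opt.isPrefixOf (w.drop pos)) with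
      | none => simpa [pvPgLoop, hend, hf] using ih pos m
      | some opt =>
        have h := ih (pos + opt.length) (m ++ [(idx, opt)])
        have hstep : pvPgLoop w ((idx, options) :: t) pos m
            = pvPgLoop w t (pos + opt.length) (m ++ [(idx, opt)]) := by
          simp [pvPgLoop, hend, hf]
        rw [hstep]; omega

-- the main invariant of parse_greedy's loop versus B's length fold
theorem pvPgLoop_spec (w : List Char) (L : List (Int × List (List Char)))
    (hne : ∀ p ∈ L, ∀ o ∈ p.2, o ≠ ([] : List Char)) :
    ∀ (pos : Nat) (m : List (Int × List Char)), pos ≤ w.length →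
    (pvPgLoop w L pos m).1 = (L.map Prod.snd).foldl (pvAdvance w) pos ∧
    (pvPgLoop w L pos m).1 ≤ w.length ∧
    ((pvPgLoop w L pos m).2 = m ↔ (pvPgLoop w L pos m).1 = pos) := by
  induction L with
  | nil => intro pos m hpos; exact ⟨rfl, hpos, by simp [pvPgLoop]⟩
  | cons p t ih =>
    intro pos m hpos
    obtain ⟨idx, options⟩ := p
    by_cases hend : w.length ≤ pos
    · have hpe : pos = w.length := le_antisymm hpos hend
      have : pvPgLoop w ((idx, options) :: t) pos m = (pos, m) := by
        simp [pvPgLoop, hend]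
      rw [this]
      subst hpe
      refine ⟨?_, le_refl _, by simp⟩
      simp only [List.map_cons, List.foldl_cons]
      rw [pvAdvance_at_end w options (hne (idx, options) (by simp))]
      exact (foldl_advance_at_end w (t.map Prod.snd)
        (by intro os hos o ho
            obtain ⟨q, hq, rfl⟩ := List.mem_map.mp hos
            exact hne q (by simp [hq]) o ho)).symm
    · rw [not_le] at hend
      cases hf : options.find? (fun opt => opt.isPrefixOf (w.drop pos)) with
      | none =>
        have hstep : pvPgLoop w ((idx, options) :: t) pos m = pvPgLoop w t pos m := by
          simp [pvPgLoop, hend, hf]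
        have hadv : pvAdvance w pos options = pos := by unfold pvAdvance; rw [hf]
        obtain ⟨h1, h2, h3⟩ := ih (fun q hq => hne q (by simp [hq])) pos m hpos
        exact ⟨by rw [hstep, h1]; simp [hadv], by rw [hstep]; exact h2, by rw [hstep]; exact h3⟩
      | some opt =>
        have hmem : opt ∈ options := List.mem_of_find?_eq_some hf
        have hpre : opt.isPrefixOf (w.drop pos) = true := by
          have h := List.find?_some hf; simpa using h
        have hlen : opt.length ≤ w.length - pos := by
          have := List.IsPrefix.length_le (List.isPrefixOf_iff_prefix.mp hpre)
          simpa using this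
        have hne' : opt ≠ [] := hne (idx, options) (by simp) opt hmem
        have hoptpos : 0 < opt.length := List.length_pos_iff.mpr hne'
        have hpos' : pos + opt.length ≤ w.length := by omega
        have hstep : pvPgLoop w ((idx, options) :: t) pos m
            = pvPgLoop w t (pos + opt.length) (m ++ [(idx, opt)]) := by
          simp [pvPgLoop, hend, hf]
        have hadv : pvAdvance w pos options = pos + opt.length := by unfold pvAdvance; rw [hf]
        obtain ⟨h1, h2, h3⟩ := ih (fun q hq => hne q (by simp [hq])) (pos + opt.length)
          (m ++ [(idx, opt)]) hpos'
        refine ⟨by rw [hstep, h1]; simp [hadv], by rw [hstep]; exact h2, ?_⟩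
        rw [hstep]
        constructor
        · intro hm
          exfalso
          rcases h3 with ⟨_, h3b⟩
          -- result list extends m ++ [(idx,opt)], so it cannot equal m
          have hsfx : ∃ tl, (pvPgLoop w t (pos + opt.length) (m ++ [(idx, opt)])).2
              = (m ++ [(idx, opt)]) ++ tl := pvPgLoop_suffix w t (pos + opt.length) (m ++ [(idx, opt)])
          obtain ⟨tl, htl⟩ := hsfx
          rw [htl] at hm
          have : m.length = m.length + 1 + tl.length := by
            have := congrArg List.length hm
            simpa using this.symm
          omega
        · intro hp
          exfalso
          have := h2
          have hge : pos + opt.length ≤ (pvPgLoop w t (pos + opt.length) (m ++ [(idx, opt)])).1 :=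
            pvPgLoop_pos_le w t (pos + opt.length) (m ++ [(idx, opt)])
          omega

theorem isBase_eq (w : List Char) : pvIsBase w = pvIsBaseB w := by
  have hne : ∀ p ∈ PySem.List.enumerate pvSlotsV8, ∀ o ∈ p.2, o ≠ ([] : List Char) := by decide
  obtain ⟨h1, h2, h3⟩ := pvPgLoop_spec w (PySem.List.enumerate pvSlotsV8) hne 0 [] (Nat.zero_le _)
  rw [show (PySem.List.enumerate pvSlotsV8).map Prod.snd = pvSlotsV8 from by decide] at h1
  unfold pvIsBase pvParseGreedy pvIsBaseB pvGreedyLen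
  rw [Bool.eq_iff_iff]
  simp only [Bool.and_eq_true, beq_iff_eq, Bool.not_eq_true', List.isEmpty_eq_false_iff,
    decide_eq_true_eq, ne_eq]
  rw [← h1, List.drop_eq_nil_iff, not_congr h3]
  omega

-- the innermost loop of A as a first-hit search over its index list
theorem pvLoopKK_eq (s : List Char) (l : List Nat) :
    pvLoopKK s l = l.findSome? (fun k =>
      if pvIsBase (s.take k) then
        (if pvIsBase (s.drop k) then some [s.drop k] else none).map (fun r => s.take k :: r)
      else none) := by
  induction l with
  | nil => rfl
  | cons k t ih =>
    rw [List.findSome?_cons]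
    by_cases h1 : pvIsBase (s.take k) <;> by_cases h2 : pvIsBase (s.drop k) <;>
      simp [pvLoopKK, h1, h2, ih]

-- the middle loop of A as a first-hit search over its index list
theorem pvLoopJ_eq (s : List Char) (l : List Nat) :
    pvLoopJ s l = l.findSome? (fun j =>
      if pvIsBase (s.take j) then
        (if pvIsBase (s.drop j) then some [s.drop j]
         else pvLoopKK (s.drop j) (List.range' 1 ((s.drop j).length - 1))).map
          (fun r => s.take j :: r)
      else none) := by
  induction l with
  | nil => rfl
  | cons j t ih =>
    rw [List.findSome?_cons]
    by_cases h1 : pvIsBase (s.take j)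
    · by_cases h2 : pvIsBase (s.drop j)
      · simp [pvLoopJ, h1, h2]
      · cases hkk : pvLoopKK (s.drop j) (List.range' 1 ((s.drop j).length - 1)) <;>
          simp only [List.length_drop] at hkk <;>
          simp [pvLoopJ, h1, h2, hkk, ih]
    · simp [pvLoopJ, h1, ih]

-- the outer loop of A as a first-hit search over its index list
theorem pvLoopI_eq (w : List Char) (l : List Nat) :
    pvLoopI w l = l.findSome? (fun i =>
      if pvIsBase (w.take i) then
        (if pvIsBase (w.drop i) then some [w.drop i]
         else pvLoopJ (w.drop i) (List.range' 1 ((w.drop i).length - 1))).map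
          (fun r => w.take i :: r)
      else none) := by
  induction l with
  | nil => rfl
  | cons i t ih =>
    rw [List.findSome?_cons]
    by_cases h1 : pvIsBase (w.take i)
    · by_cases h2 : pvIsBase (w.drop i)
      · simp [pvLoopI, h1, h2]
      · cases hj : pvLoopJ (w.drop i) (List.range' 1 ((w.drop i).length - 1)) <;>
          simp only [List.length_drop] at hj <;>
          simp [pvLoopI, h1, h2, hj, ih]
    · simp [pvLoopI, h1, ih]

-- re-indexing: B's search over absolute cut positions k ∈ range'(i+1, …) equals a
-- search over relative positions k' ∈ range'(1, …) in the suffix w.drop i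
theorem pvShift {α : Type} (w : List Char) (i : Nat) (G : Nat → Nat → Option α) :
    (List.range' (i + 1) (w.length - (i + 1))).findSome? (fun k => G (k - i) k)
      = (List.range' 1 ((w.drop i).length - 1)).findSome? (fun k' => G k' (i + k')) := by
  have hn : (w.drop i).length - 1 = w.length - (i + 1) := by simp; omega
  rw [hn, List.range'_eq_map_range, List.range'_eq_map_range, List.findSome?_map, List.findSome?_map]
  refine congrFun (congrArg _ ?_) _
  funext j
  simp only [Function.comp]
  have e1 : i + 1 + j - i = 1 + j := by omega
  have e2 : i + 1 + j = i + (1 + j) := by omega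
  rw [e1, e2]

theorem pvRecB_one (w : List Char) (i : Nat) :
    pvRecB 1 w i = if pvIsBaseB (w.drop i) then some [w.drop i] else none := by
  rw [show (1 : Nat) = 0 + 1 from rfl, pvRecB.eq_2]
  by_cases h : pvIsBaseB (w.drop i) <;> simp [h]

theorem pvRecB_two (w : List Char) (i : Nat) :
    pvRecB 2 w i = if pvIsBaseB (w.drop i) then some [w.drop i]
      else pvLoopKK (w.drop i) (List.range' 1 ((w.drop i).length - 1)) := by
  rw [show (2 : Nat) = 1 + 1 from rfl, pvRecB.eq_2]
  by_cases h : pvIsBaseB (w.drop i)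
  · simp [h]
  · rw [if_neg h, if_neg h, if_neg (by omega)]
    rw [pvLoopKK_eq]
    refine (pvShift w i (fun m k =>
      if pvIsBaseB ((w.drop i).take m) then
        (pvRecB 1 w k).map (fun r => (w.drop i).take m :: r)
      else none)).trans ?_
    refine congrFun (congrArg _ ?_) _
    funext k'
    simp only [isBase_eq]
    by_cases hk : pvIsBaseB ((w.drop i).take k')
    · rw [if_pos hk, if_pos hk, pvRecB_one]
      rw [show w.drop (i + k') = (w.drop i).drop k' from (List.drop_drop).symm]
    · rw [if_neg hk, if_neg hk]

theorem pvRecB_three (w : List Char) (i : Nat) :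
    pvRecB 3 w i = if pvIsBaseB (w.drop i) then some [w.drop i]
      else pvLoopJ (w.drop i) (List.range' 1 ((w.drop i).length - 1)) := by
  rw [show (3 : Nat) = 2 + 1 from rfl, pvRecB.eq_2]
  by_cases h : pvIsBaseB (w.drop i)
  · simp [h]
  · rw [if_neg h, if_neg h, if_neg (by omega)]
    rw [pvLoopJ_eq]
    refine (pvShift w i (fun m k =>
      if pvIsBaseB ((w.drop i).take m) then
        (pvRecB 2 w k).map (fun r => (w.drop i).take m :: r)
      else none)).trans ?_
    refine congrFun (congrArg _ ?_) _
    funext k'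
    simp only [isBase_eq]
    by_cases hk : pvIsBaseB ((w.drop i).take k')
    · rw [if_pos hk, if_pos hk, pvRecB_two]
      rw [show w.drop (i + k') = (w.drop i).drop k' from (List.drop_drop).symm]
    · rw [if_neg hk, if_neg hk]

-- ===== VERDICT (by name: the statement is the Claim_ definition above) =====
theorem find_v8_splits_first_spec : Claim_equal_find_v8_splits_first := by
  intro word _
  unfold Spec_find_v8_splits_first find_v8_splits_first find_v8_splits_first_alt
  rw [pvLoopI_eq]
  apply congrArg
  refine congrFun (congrArg _ ?_) _
  funext i
  simp only [isBase_eq]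
  by_cases hi : pvIsBaseB (word.toList.take i)
  · rw [if_pos hi, if_pos hi, pvRecB_three]
  · rw [if_neg hi, if_neg hi]
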